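-- pv_equiv track=rewrite | github.com/mmohebbi2470/payroll-dashboard | backend/employee_deductions_universal_v22_FIXED_v2.py | make_unique_in_order
-- ===== SOURCE A (Python) =====
-- def make_unique_in_order(names):
--     counts = {}
--     out = []
--     for n in names:
--         if n not in counts:
--             counts[n] = 1
--             out.append(n)
--         else:
--             counts[n] += 1
--             out.append(f"{n} ({counts[n]})" if n.upper() != "TOTAL" else f"TOTAL ({counts[n]})")
--     return out
-- ===== SOURCE B (Python) =====
-- def make_unique_in_order(names):
--     # Pass 1: total multiplicity of every name.
--     remaining = {}
--     for n in names:
--         remaining[n] = remaining.get(n, 0) + 1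
--     # Pass 2: walk right-to-left; remaining[n] is exactly the occurrence
--     # number of this position (count of n up to and including it), since
--     # every occurrence to its right has already been decremented away.
--     out = []
--     for n in reversed(names):
--         occ = remaining[n]
--         remaining[n] = occ - 1
--         if occ == 1:
--             out.append(n)
--         elif n.upper() == "TOTAL":
--             out.append(f"TOTAL ({occ})")
--         else:
--             out.append(f"{n} ({occ})")
--     out.reverse()
--     return out
-- ===== Notes on version B (the rewrite author's own statement) =====
-- stated objective: alternative
-- what changed: Replaces A's single forward pass with incrementing seen-counts by two staged passes: first a totals counter over the whole list, then a right-to-left traversal that derives each occurrence number by decrementing the total, assembling the output back-to-front and reversing it.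
import Mathlib
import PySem

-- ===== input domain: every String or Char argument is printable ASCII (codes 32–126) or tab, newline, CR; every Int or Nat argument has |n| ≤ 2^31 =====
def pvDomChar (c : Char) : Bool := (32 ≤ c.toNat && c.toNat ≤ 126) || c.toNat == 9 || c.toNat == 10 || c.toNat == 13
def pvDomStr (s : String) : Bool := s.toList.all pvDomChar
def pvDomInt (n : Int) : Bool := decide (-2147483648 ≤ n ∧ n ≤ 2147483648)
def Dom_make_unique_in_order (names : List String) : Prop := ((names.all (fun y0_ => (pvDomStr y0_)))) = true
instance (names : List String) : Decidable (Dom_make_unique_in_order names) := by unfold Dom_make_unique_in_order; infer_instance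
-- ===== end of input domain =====

-- B replaces A's single forward pass of incrementing seen-counts by two staged passes:
-- a totals counter, then a right-to-left traversal deriving each occurrence number by
-- decrementing the total, building the output back-to-front (objective: alternative).


-- ===== PORT A =====
-- one iteration of A's loop: state is (counts, out)
def muioStep (st : PySem.Dict String Int × List String) (n : String) :
    PySem.Dict String Int × List String :=
  let counts := st.1
  let out := st.2
  if counts.contains n = false then
    (counts.insert n 1, out ++ [n])
  else
    let c := counts.getD n 0 + 1           -- counts[n] += 1
    (counts.insert n c,
     out ++ [if PySem.Str.upper n ≠ "TOTAL"
               then n ++ " (" ++ PySem.Int.toStr c ++ ")"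
               else "TOTAL (" ++ PySem.Int.toStr c ++ ")"])

def make_unique_in_order (names : List String) : List String :=
  (names.foldl muioStep (PySem.Dict.empty, [])).2

-- ===== PORT B =====
-- one iteration of B's second (right-to-left) loop: state is (remaining, out)
-- `remaining[n]` in Python is direct indexing; the key is always present there,
-- so `getD n 0` is exact.
def muioStepB (st : PySem.Dict String Int × List String) (n : String) :
    PySem.Dict String Int × List String :=
  let occ := st.1.getD n 0
  (st.1.insert n (occ - 1),
   st.2 ++ [if occ = 1 then n
            else if PySem.Str.upper n = "TOTAL" then "TOTAL (" ++ PySem.Int.toStr occ ++ ")"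
            else n ++ " (" ++ PySem.Int.toStr occ ++ ")"])

def make_unique_in_order_alt (names : List String) : List String :=
  -- pass 1: totals
  let remaining := names.foldl (fun d n => d.insert n (d.getD n 0 + 1)) PySem.Dict.empty
  -- pass 2: reversed traversal with decrementing counts
  let res := names.reverse.foldl muioStepB (remaining, [])
  res.2.reverse

-- ===== PRECONDITION & SPEC =====
def Spec_make_unique_in_order (names : List String) (out : List String) : Prop := out = make_unique_in_order_alt names
instance (names : List String) (out : List String) : Decidable (Spec_make_unique_in_order names out) := by unfold Spec_make_unique_in_order; infer_instance

-- ===== CLAIM (what is proved, stated in full; the proofs are below) =====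
def Claim_equal_make_unique_in_order : Prop := ∀ (names : List String), Dom_make_unique_in_order names → Spec_make_unique_in_order names (make_unique_in_order names)

-- ===== LEMMAS AND PROOFS =====

-- how one name is rendered, given its occurrence number
def muioRend (occ : Int) (n : String) : String :=
  if occ = 1 then n
  else if PySem.Str.upper n = "TOTAL" then "TOTAL (" ++ PySem.Int.toStr occ ++ ")"
  else n ++ " (" ++ PySem.Int.toStr occ ++ ")"

-- reference recursion: process `rest` after the already-seen prefix `pref`
def muioGo (pref rest : List String) : List String :=
  match rest with
  | [] => []
  | n :: rest => muioRend ((pref.count n : Int) + 1) n :: muioGo (pref ++ [n]) rest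

-- the invariant that ties A's dict to the processed prefix
def muioInv (counts : PySem.Dict String Int) (pref : List String) : Prop :=
  ∀ n, counts.get? n = if pref.count n = 0 then none else some (pref.count n : Int)

lemma muio_loop_go :
    ∀ (rest : List String) (counts : PySem.Dict String Int) (out pref : List String),
    muioInv counts pref →
    (rest.foldl muioStep (counts, out)).2 = out ++ muioGo pref rest := by
  intro rest
  induction rest with
  | nil => intro counts out pref _; simp [muioGo]
  | cons n rest ih =>
    intro counts out pref hinv
    rw [List.foldl_cons]
    by_cases h0 : pref.count n = 0
    · have hget : counts.get? n = none := by rw [hinv n, if_pos h0]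
      have hcont : counts.contains n = false := by
        simp [PySem.Dict.contains_eq_isSome_get?, hget]
      have hstep : muioStep (counts, out) n = (counts.insert n 1, out ++ [n]) := by
        simp [muioStep, hcont]
      have hinv' : muioInv (counts.insert n 1) (pref ++ [n]) := by
        intro m
        by_cases hm : m = n
        · subst hm
          rw [PySem.Dict.get?_insert_self]
          have : (pref ++ [m]).count m = 1 := by simp [List.count_append, h0]
          rw [this]
          simp
        · rw [PySem.Dict.get?_insert_of_ne _ _ hm, hinv m]
          have : (pref ++ [n]).count m = pref.count m := by
            simp [List.count_append, Ne.symm hm]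
          rw [this]
      rw [hstep, ih _ _ (pref ++ [n]) hinv', muioGo]
      have : muioRend ((pref.count n : Int) + 1) n = n := by
        simp [muioRend, h0]
      rw [this, List.append_assoc]
      rfl
    · have hget : counts.get? n = some (pref.count n : Int) := by rw [hinv n, if_neg h0]
      have hcont : counts.contains n = true := by
        simp [PySem.Dict.contains_eq_isSome_get?, hget]
      have hc : counts.getD n 0 + 1 = (pref.count n : Int) + 1 := by
        rw [PySem.Dict.getD_eq_get?_getD, hget]; rfl
      have hstep : muioStep (counts, out) n =
          (counts.insert n ((pref.count n : Int) + 1),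
           out ++ [if PySem.Str.upper n ≠ "TOTAL"
                     then n ++ " (" ++ PySem.Int.toStr ((pref.count n : Int) + 1) ++ ")"
                     else "TOTAL (" ++ PySem.Int.toStr ((pref.count n : Int) + 1) ++ ")"]) := by
        simp [muioStep, hcont, hc]
      rw [hstep, ih _ _ (pref ++ [n]) ?_, muioGo]
      · have hne1 : ¬ ((pref.count n : Int) + 1 = 1) := by
          intro hh
          have : (pref.count n : Int) = 0 := by omega
          exact h0 (by exact_mod_cast this)
        have hrend : muioRend ((pref.count n : Int) + 1) n =
            (if PySem.Str.upper n ≠ "TOTAL"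
               then n ++ " (" ++ PySem.Int.toStr ((pref.count n : Int) + 1) ++ ")"
               else "TOTAL (" ++ PySem.Int.toStr ((pref.count n : Int) + 1) ++ ")") := by
          rw [muioRend, if_neg hne1]
          by_cases ht : PySem.Str.upper n = "TOTAL"
          · simp [ht]
          · simp [ht]
        rw [hrend, List.append_assoc]
        rfl
      · intro m
        by_cases hm : m = n
        · subst hm
          rw [PySem.Dict.get?_insert_self]
          have : (pref ++ [m]).count m = pref.count m + 1 := by
            simp [List.count_append]
          rw [this]
          simp [Nat.cast_add]
        · rw [PySem.Dict.get?_insert_of_ne _ _ hm, hinv m]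
          have : (pref ++ [n]).count m = pref.count m := by
            simp [List.count_append, Ne.symm hm]
          rw [this]

-- muioGo splits over an append of the remaining input
lemma muioGo_append (r1 : List String) :
    ∀ (pref r2 : List String),
    muioGo pref (r1 ++ r2) = muioGo pref r1 ++ muioGo (pref ++ r1) r2 := by
  induction r1 with
  | nil => intro pref r2; simp [muioGo]
  | cons n r1 ih =>
    intro pref r2
    simp only [List.cons_append, muioGo, ih (pref ++ [n]) r2, List.append_assoc]
    rfl

-- B's reversed loop produces the renders of `xs` back-to-front, given that the
-- dict holds exactly the multiplicities of the unprocessed part `xs`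
lemma muio_rev_go (xs : List String) :
    ∀ (d : PySem.Dict String Int) (out : List String),
    (∀ n ∈ xs, d.getD n 0 = (xs.count n : Int)) →
    (xs.reverse.foldl muioStepB (d, out)).2 = out ++ (muioGo [] xs).reverse := by
  induction xs using List.reverseRecOn with
  | nil => intro d out _; simp [muioGo]
  | append_singleton ys n ih =>
    intro d out h
    have hocc : d.getD n 0 = (ys.count n : Int) + 1 := by
      have := h n (by simp)
      rw [this]
      simp [List.count_append]
    have hocc1 : d.getD n 0 = 1 ↔ ys.count n = 0 := by
      rw [hocc]
      constructor
      · intro hh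
        have : (ys.count n : Int) = 0 := by omega
        exact_mod_cast this
      · intro hh; rw [hh]; rfl
    have hrend :
        (if d.getD n 0 = 1 then n
         else if PySem.Str.upper n = "TOTAL" then "TOTAL (" ++ PySem.Int.toStr (d.getD n 0) ++ ")"
         else n ++ " (" ++ PySem.Int.toStr (d.getD n 0) ++ ")") =
        muioRend ((ys.count n : Int) + 1) n := by
      rw [muioRend, ← hocc]
    have hstep : muioStepB (d, out) n =
        (d.insert n (d.getD n 0 - 1), out ++ [muioRend ((ys.count n : Int) + 1) n]) := by
      simp only [muioStepB, hrend]
    have hinv' : ∀ m ∈ ys, (d.insert n (d.getD n 0 - 1)).getD m 0 = (ys.count m : Int) := by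
      intro m hm
      by_cases hmn : m = n
      · subst hmn
        rw [PySem.Dict.getD_insert_self, hocc]
        ring
      · rw [PySem.Dict.getD_insert, if_neg hmn, h m (by simp [hm])]
        simp [List.count_append, Ne.symm hmn]
    have hsplit : muioGo [] (ys ++ [n]) =
        muioGo [] ys ++ [muioRend ((ys.count n : Int) + 1) n] := by
      rw [muioGo_append ys [] [n]]
      simp [muioGo]
    rw [List.reverse_append, List.reverse_singleton, List.singleton_append,
        List.foldl_cons, hstep, ih _ _ hinv', hsplit]
    simp

-- ===== VERDICT (by name: the statement is the Claim_ definition above) =====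
theorem make_unique_in_order_spec : Claim_equal_make_unique_in_order := by
  intro names _
  show make_unique_in_order names = make_unique_in_order_alt names
  have ha : make_unique_in_order names = [] ++ muioGo [] names := by
    apply muio_loop_go
    intro n
    simp [PySem.Dict.get?_empty]
  have hb : make_unique_in_order_alt names = muioGo [] names := by
    show (List.foldl muioStepB
        (names.foldl (fun d n => d.insert n (d.getD n 0 + 1)) PySem.Dict.empty, [])
        names.reverse).2.reverse = muioGo [] names
    rw [PySem.Dict.foldl_insert_getD_add_one_eq_counter,
        muio_rev_go names _ [] (fun n _ => PySem.Dict.getD_counter names n)]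
    simp
  rw [ha, hb]
  rfl
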